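-- pv_equiv track=rewrite | github.com/Andrei-tr-3773/ai-smm-platform-b2b | agents/blog_generator_agent.py | _generate_meta_tags
-- ===== SOURCE A (Python) =====
-- from typing import Dict, Any
--
-- def _generate_meta_tags(content: str, topic: str) -> Dict[str, str]:
--     """
--     Generate basic SEO meta tags from content.
--
--     Args:
--         content: Generated blog content (Markdown)
--         topic: Blog topic
--
--     Returns:
--         Dict with title and description
--     """
--     # Extract first H1 heading as title
--     lines = [line.strip() for line in content.split('\n') if line.strip()]
--
--     # Find first H1 (# heading)
--     title = topic  # Default to topic
--     for line in lines:
--         if line.startswith('# '):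
--             title = line[2:].strip()
--             break
--
--     # Truncate to 60 chars for SEO
--     meta_title = title[:60]
--
--     # Extract first paragraph (not heading) as description
--     description = ""
--     for line in lines:
--         # Skip headings and empty lines
--         if line.startswith('#') or not line:
--             continue
--         # Skip markdown formatting
--         clean_line = line.replace('**', '').replace('*', '').replace('[', '').replace(']', '')
--         if len(clean_line) > 50:  # Must be substantial
--             description = clean_line
--             break
--
--     # Truncate to 160 chars for SEO
--     if len(description) > 160:
--         description = description[:157] + "..."
--
--     # Fallback if no description found
--     if not description:
--         description = f"Learn about {topic}. Read our comprehensive guide."[:160]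
--
--     return {
--         "title": meta_title,
--         "description": description
--     }
-- ===== SOURCE B (Python) =====
-- def _generate_meta_tags(content: str, topic: str):
--     """Single fused pass over the raw lines with two 'found' slots instead of
--     A's list-comprehension plus two separate scans."""
--     title = None
--     description = None
--     for raw in content.split('\n'):
--         line = raw.strip()
--         if not line:
--             continue
--         if title is None and line.startswith('# '):
--             title = line[2:].strip()
--         elif description is None and not line.startswith('#'):
--             clean = line.replace('**', '').replace('*', '').replace('[', '').replace(']', '')
--             if len(clean) > 50:
--                 description = clean
--         if title is not None and description is not None:
--             break
--     meta_title = (topic if title is None else title)[:60]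
--     if description is None:
--         description = f"Learn about {topic}. Read our comprehensive guide."[:160]
--     elif len(description) > 160:
--         description = description[:157] + "..."
--     return {"title": meta_title, "description": description}
-- ===== Notes on version B (the rewrite author's own statement) =====
-- stated objective: alternative
-- what changed: A builds a stripped-line list then runs two separate scans (one for the H1 title, one for the first substantial paragraph); B makes one fused pass over the raw lines with two Option slots and stops as soon as both are found.
import Mathlib
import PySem

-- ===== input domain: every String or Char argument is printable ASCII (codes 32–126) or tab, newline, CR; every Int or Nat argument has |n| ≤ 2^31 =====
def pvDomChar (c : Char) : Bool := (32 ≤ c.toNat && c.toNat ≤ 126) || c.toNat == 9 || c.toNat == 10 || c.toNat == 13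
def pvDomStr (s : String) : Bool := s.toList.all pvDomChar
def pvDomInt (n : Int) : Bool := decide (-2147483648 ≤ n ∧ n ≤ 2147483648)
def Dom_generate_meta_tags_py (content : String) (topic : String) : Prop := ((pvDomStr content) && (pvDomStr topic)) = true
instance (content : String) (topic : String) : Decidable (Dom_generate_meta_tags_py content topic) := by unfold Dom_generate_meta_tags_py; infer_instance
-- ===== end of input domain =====

-- B replaces A's list comprehension + two separate scans by one fused pass over the raw
-- lines that tracks two Option slots (objective: alternative decomposition, same cost).

-- ===== PORT A =====
-- content.split('\n'): the sep is the literal "\n" ≠ "", so split? is always `some`; getD [] is exact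
def pvSplitA (s : String) : List String := (PySem.Str.split? s "\n").getD []

-- the comprehension [line.strip() for line in … if line.strip()]
def pvCompLinesA (raws : List String) : List String :=
  raws.filterMap
    (fun line => if PySem.Str.len (PySem.Str.strip line) == 0 then none else some (PySem.Str.strip line))

def pvCleanA (line : String) : String :=
  PySem.Str.replace (PySem.Str.replace (PySem.Str.replace (PySem.Str.replace line "**" "") "*" "") "[" "") "]" ""

-- 'for line in lines: if line.startswith('# '): title = …; break'  (none = never assigned)
def pvTitleLoopA : List String → Option String
  | [] => none
  | l :: ls =>
    if PySem.Str.startswith l "# " then some (PySem.Str.strip (PySem.Str.slice l (some 2) none))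
    else pvTitleLoopA ls

-- the description loop: accumulator starts at "", break on the first substantial clean line
def pvDescLoopA : List String → String
  | [] => ""
  | l :: ls =>
    if PySem.Str.startswith l "#" || PySem.Str.len l == 0 then pvDescLoopA ls
    else if 50 < PySem.Str.len (pvCleanA l) then pvCleanA l
    else pvDescLoopA ls

def pvConcatA (a b : String) : String := String.ofList (a.toList ++ b.toList)

def generate_meta_tags_py (content : String) (topic : String) : List (String × String) :=
  let lines := pvCompLinesA (pvSplitA content)
  let title := (pvTitleLoopA lines).getD topic
  let meta_title := PySem.Str.slice title none (some 60)
  let description := pvDescLoopA lines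
  let description :=
    if 160 < PySem.Str.len description then pvConcatA (PySem.Str.slice description none (some 157)) "..."
    else description
  let description :=
    if PySem.Str.len description == 0 then
      PySem.Str.slice (pvConcatA (pvConcatA "Learn about " topic) ". Read our comprehensive guide.") none (some 160)
    else description
  [("title", meta_title), ("description", description)]

-- ===== PORT B =====
def pvSplitB (s : String) : List String := (PySem.Str.split? s "\n").getD []

def pvCleanB (line : String) : String :=
  PySem.Str.replace (PySem.Str.replace (PySem.Str.replace (PySem.Str.replace line "**" "") "*" "") "[" "") "]" ""

def pvConcatB (a b : String) : String := String.ofList (a.toList ++ b.toList)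

-- the fused single pass: two Option slots, break as soon as both are filled
def pvScanB : List String → Option String → Option String → Option String × Option String
  | [], t?, d? => (t?, d?)
  | raw :: rest, t?, d? =>
    if PySem.Str.len (PySem.Str.strip raw) == 0 then pvScanB rest t? d?
    else
      let st :=
        if t?.isNone && PySem.Str.startswith (PySem.Str.strip raw) "# " then
          (some (PySem.Str.strip (PySem.Str.slice (PySem.Str.strip raw) (some 2) none)), d?)
        else if d?.isNone && !PySem.Str.startswith (PySem.Str.strip raw) "#" then
          (t?, if 50 < PySem.Str.len (pvCleanB (PySem.Str.strip raw)) then some (pvCleanB (PySem.Str.strip raw)) else d?)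
        else (t?, d?)
      if st.1.isSome && st.2.isSome then st else pvScanB rest st.1 st.2

def generate_meta_tags_py_alt (content : String) (topic : String) : List (String × String) :=
  let r := pvScanB (pvSplitB content) none none
  let meta_title := PySem.Str.slice (r.1.getD topic) none (some 60)
  let description :=
    match r.2 with
    | none => PySem.Str.slice (pvConcatB (pvConcatB "Learn about " topic) ". Read our comprehensive guide.") none (some 160)
    | some d => if 160 < PySem.Str.len d then pvConcatB (PySem.Str.slice d none (some 157)) "..." else d
  [("title", meta_title), ("description", description)]

-- ===== PRECONDITION & SPEC =====
def Spec_generate_meta_tags_py (content : String) (topic : String) (out : List (String × String)) : Prop := out = generate_meta_tags_py_alt content topic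
instance (content : String) (topic : String) (out : List (String × String)) : Decidable (Spec_generate_meta_tags_py content topic out) := by unfold Spec_generate_meta_tags_py; infer_instance

-- ===== CLAIM (what is proved, stated in full; the proofs are below) =====
def Claim_equal_generate_meta_tags_py : Prop := ∀ (content : String) (topic : String), Dom_generate_meta_tags_py content topic → Spec_generate_meta_tags_py content topic (generate_meta_tags_py content topic)

-- ===== LEMMAS AND PROOFS =====

-- option-valued view of A's description loop (proof helper only)
def pvDescOpt : List String → Option String
  | [] => none
  | l :: ls =>
    if PySem.Str.startswith l "#" || PySem.Str.len l == 0 then pvDescOpt ls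
    else if 50 < PySem.Str.len (pvCleanA l) then some (pvCleanA l)
    else pvDescOpt ls

lemma pvDescLoopA_eq (L : List String) : pvDescLoopA L = (pvDescOpt L).getD "" := by
  induction L with
  | nil => rfl
  | cons l ls ih =>
    rw [pvDescLoopA, pvDescOpt]
    generalize pvCleanA l = c
    by_cases h1 : (PySem.Str.startswith l "#" || PySem.Str.len l == 0) = true
    · rw [if_pos h1, if_pos h1, ih]
    · rw [if_neg h1, if_neg h1]
      by_cases h2 : 50 < PySem.Str.len c
      · rw [if_pos h2, if_pos h2]; rfl
      · rw [if_neg h2, if_neg h2, ih]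

lemma pvDescOpt_some_len (L : List String) (d : String) (h : pvDescOpt L = some d) :
    50 < PySem.Str.len d := by
  induction L with
  | nil => simp [pvDescOpt] at h
  | cons l ls ih =>
    rw [pvDescOpt] at h
    generalize hg : pvCleanA l = c at h
    by_cases h1 : (PySem.Str.startswith l "#" || PySem.Str.len l == 0) = true
    · rw [if_pos h1] at h; exact ih h
    · rw [if_neg h1] at h
      by_cases h2 : 50 < PySem.Str.len c
      · rw [if_pos h2] at h; cases h; exact h2
      · rw [if_neg h2] at h; exact ih h

lemma pvStartswith_hash_of_hash_space (l : String)
    (h : PySem.Str.startswith l "# " = true) : PySem.Str.startswith l "#" = true := by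
  have h' := (PySem.Str.startswith_eq l "# ") ▸ h
  rw [PySem.Str.startswith_eq]
  rw [PySem.Chars.startswith_iff] at h' ⊢
  exact List.IsPrefix.trans (by decide) h'

lemma pvScanB_eq (raws : List String) (t? d? : Option String) :
    pvScanB raws t? d? =
      (t?.or (pvTitleLoopA (pvCompLinesA raws)), d?.or (pvDescOpt (pvCompLinesA raws))) := by
  induction raws generalizing t? d? with
  | nil => simp [pvScanB, pvCompLinesA, pvTitleLoopA, pvDescOpt]
  | cons raw rest ih =>
    simp only [pvScanB]
    by_cases hz : (PySem.Str.len (PySem.Str.strip raw) == 0) = true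
    · rw [if_pos hz]
      have hl : pvCompLinesA (raw :: rest) = pvCompLinesA rest := by
        simp only [pvCompLinesA, List.filterMap_cons]
        rw [if_pos hz]
      rw [hl]; exact ih t? d?
    · rw [if_neg hz]
      have hz' : (PySem.Str.len (PySem.Str.strip raw) == 0) = false := by
        cases hx : (PySem.Str.len (PySem.Str.strip raw) == 0) with
        | false => rfl
        | true => exact absurd hx hz
      have hl : pvCompLinesA (raw :: rest) = PySem.Str.strip raw :: pvCompLinesA rest := by
        simp only [pvCompLinesA, List.filterMap_cons]
        rw [if_neg hz]
      rw [hl]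
      have hCB : pvCleanB = pvCleanA := rfl
      rw [hCB]
      generalize hg : pvCleanA (PySem.Str.strip raw) = c
      by_cases ht : (t?.isNone && PySem.Str.startswith (PySem.Str.strip raw) "# ") = true
      · rw [if_pos ht]
        obtain ⟨ht1, ht2⟩ := Bool.and_eq_true_iff.mp ht
        have hh : PySem.Str.startswith (PySem.Str.strip raw) "#" = true :=
          pvStartswith_hash_of_hash_space _ ht2
        rw [Option.isNone_iff_eq_none] at ht1
        subst ht1
        have hT : pvTitleLoopA (PySem.Str.strip raw :: pvCompLinesA rest) =
            some (PySem.Str.strip (PySem.Str.slice (PySem.Str.strip raw) (some 2) none)) := by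
          rw [pvTitleLoopA, if_pos ht2]
        have hD : pvDescOpt (PySem.Str.strip raw :: pvCompLinesA rest) = pvDescOpt (pvCompLinesA rest) := by
          rw [pvDescOpt, hg, if_pos (by rw [hh, Bool.true_or])]
        rw [hT, hD]
        cases d? with
        | some d => simp
        | none => simp [ih]
      · rw [if_neg ht]
        by_cases hd : (d?.isNone && !PySem.Str.startswith (PySem.Str.strip raw) "#") = true
        · rw [if_pos hd]
          obtain ⟨hd1, hd2⟩ := Bool.and_eq_true_iff.mp hd
          rw [Option.isNone_iff_eq_none] at hd1
          subst hd1
          have hnh : PySem.Str.startswith (PySem.Str.strip raw) "#" = false := by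
            cases hx : PySem.Str.startswith (PySem.Str.strip raw) "#" with
            | false => rfl
            | true => rw [hx] at hd2; exact absurd hd2 (by decide)
          have hnhs : PySem.Str.startswith (PySem.Str.strip raw) "# " = false := by
            cases hx : PySem.Str.startswith (PySem.Str.strip raw) "# " with
            | false => rfl
            | true => exact absurd (pvStartswith_hash_of_hash_space _ hx) (by rw [hnh]; decide)
          have hT : pvTitleLoopA (PySem.Str.strip raw :: pvCompLinesA rest) =
              pvTitleLoopA (pvCompLinesA rest) := by
            rw [pvTitleLoopA, if_neg (by rw [hnhs]; decide)]
          have hD : pvDescOpt (PySem.Str.strip raw :: pvCompLinesA rest) =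
              (if 50 < PySem.Str.len c then some c else pvDescOpt (pvCompLinesA rest)) := by
            rw [pvDescOpt, hg, if_neg (by rw [hnh, hz']; decide)]
          rw [hT, hD]
          by_cases hlen : 50 < PySem.Str.len c
          · rw [if_pos hlen, if_pos hlen]
            cases t? with
            | some t => simp
            | none => simp [ih]
          · rw [if_neg hlen, if_neg hlen]
            simp [ih]
        · rw [if_neg hd]
          cases t? with
          | some t =>
            cases d? with
            | some d => simp
            | none =>
              have hh : PySem.Str.startswith (PySem.Str.strip raw) "#" = true := by
                cases hx : PySem.Str.startswith (PySem.Str.strip raw) "#" with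
                | true => rfl
                | false => exact absurd (by rw [hx]; decide) hd
              have hD : pvDescOpt (PySem.Str.strip raw :: pvCompLinesA rest) =
                  pvDescOpt (pvCompLinesA rest) := by
                rw [pvDescOpt, hg, if_pos (by rw [hh, Bool.true_or])]
              rw [hD]
              simp [ih]
          | none =>
            have h1 : PySem.Str.startswith (PySem.Str.strip raw) "# " = false := by
              cases hx : PySem.Str.startswith (PySem.Str.strip raw) "# " with
              | false => rfl
              | true => exact absurd (by rw [hx]; decide) ht
            have hT : pvTitleLoopA (PySem.Str.strip raw :: pvCompLinesA rest) =
                pvTitleLoopA (pvCompLinesA rest) := by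
              rw [pvTitleLoopA, if_neg (by rw [h1]; decide)]
            rw [hT]
            cases d? with
            | some d => simp [ih]
            | none =>
              have hh : PySem.Str.startswith (PySem.Str.strip raw) "#" = true := by
                cases hx : PySem.Str.startswith (PySem.Str.strip raw) "#" with
                | true => rfl
                | false => exact absurd (by rw [hx]; decide) hd
              have hD : pvDescOpt (PySem.Str.strip raw :: pvCompLinesA rest) =
                  pvDescOpt (pvCompLinesA rest) := by
                rw [pvDescOpt, hg, if_pos (by rw [hh, Bool.true_or])]
              rw [hD]
              simp [ih]

lemma pvConcat_len (a b : String) :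
    PySem.Str.len (pvConcatA a b) = PySem.Str.len a + PySem.Str.len b := by
  simp [pvConcatA, PySem.Str.len_eq]

-- ===== VERDICT (by name: the statement is the Claim_ definition above) =====
set_option maxHeartbeats 2000000 in
theorem generate_meta_tags_py_spec : Claim_equal_generate_meta_tags_py := by
  intro content topic _
  unfold Spec_generate_meta_tags_py
  simp only [generate_meta_tags_py, generate_meta_tags_py_alt]
  rw [show pvSplitB content = pvSplitA content from rfl]
  rw [pvScanB_eq]
  simp only [Option.none_or]
  rw [pvDescLoopA_eq]
  generalize pvTitleLoopA (pvCompLinesA (pvSplitA content)) = T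
  generalize hdo : pvDescOpt (pvCompLinesA (pvSplitA content)) = D
  have hCB : pvConcatB = pvConcatA := rfl
  rw [hCB]
  cases D with
  | none =>
    simp only [Option.getD_none]
    rw [if_neg (show ¬ 160 < PySem.Str.len "" by decide)]
    rw [if_pos (show (PySem.Str.len "" == 0) = true by decide)]
  | some d =>
    have hdlen := pvDescOpt_some_len _ d hdo
    simp only [Option.getD_some]
    by_cases h160 : 160 < PySem.Str.len d
    · rw [if_pos h160]
      have hnz : ¬ (PySem.Str.len (pvConcatA (PySem.Str.slice d none (some 157)) "...") == 0) = true := by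
        rw [pvConcat_len]
        have h3 : PySem.Str.len ("..." : String) = 3 := by decide
        have h157 : 0 ≤ PySem.Str.len (PySem.Str.slice d none (some 157)) := by
          rw [PySem.Str.len_eq]; positivity
        simp only [beq_iff_eq]
        omega
      rw [if_neg hnz]
    · rw [if_neg h160]
      have hnz : ¬ (PySem.Str.len d == 0) = true := by
        simp only [beq_iff_eq]; omega
      rw [if_neg hnz]
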